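-- pv_equiv track=rewrite | github.com/eunhoo0059342/python_class | class46.py | sortByValue
-- ===== SOURCE A (Python) =====
-- def sortByValue(dic) :
--     sorted_values = sorted(dic.values()) # Sort the values
--     sorted_dict = {}
--     for i in sorted_values:
--         for k in dic.keys():
--             if dic[k] == i:
--                 sorted_dict[k] = dic[k]
--                 break
--     return sorted_dict
-- ===== SOURCE B (Python) =====
-- def sortByValue(dic):
--     # one pass to record the first key carrying each value, then one sort of the distinct values
--     first_key = {}
--     for k, v in dic.items():
--         if v not in first_key:
--             first_key[v] = k
--     return {first_key[v]: v for v in sorted(first_key)}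
-- ===== Notes on version B (the rewrite author's own statement) =====
-- stated objective: faster
-- what changed: A rescans every key of the dict for each sorted value (quadratic nested loops); B makes one pass recording the first key per value in a dict and then sorts only the distinct values once.
import Mathlib
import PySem

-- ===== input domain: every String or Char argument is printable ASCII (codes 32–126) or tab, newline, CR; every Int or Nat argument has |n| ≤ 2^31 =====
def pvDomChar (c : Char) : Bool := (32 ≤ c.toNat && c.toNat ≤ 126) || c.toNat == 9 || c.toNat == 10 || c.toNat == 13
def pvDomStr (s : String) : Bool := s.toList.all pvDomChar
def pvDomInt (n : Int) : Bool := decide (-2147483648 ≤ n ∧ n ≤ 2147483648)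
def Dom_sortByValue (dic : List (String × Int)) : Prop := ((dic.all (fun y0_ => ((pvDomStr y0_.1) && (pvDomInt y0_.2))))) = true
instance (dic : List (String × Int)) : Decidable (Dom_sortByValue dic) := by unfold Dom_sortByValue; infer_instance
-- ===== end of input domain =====

-- B replaces A's quadratic scan-per-value with a one-pass value→first-key map plus one sort of the distinct values.


-- ===== PORT A =====
-- inner loop 'for k in dic.keys(): if dic[k] == i: sorted_dict[k] = dic[k]; break'
-- (dic[k] cannot raise: k is drawn from dic.keys(), so getD with a dummy default is exact here)
def pvAInner (d : PySem.Dict String Int) (i : Int) (sd : PySem.Dict String Int) :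
    List String → PySem.Dict String Int
  | [] => sd
  | k :: ks => if d.getD k 0 == i then sd.insert k (d.getD k 0) else pvAInner d i sd ks

def sortByValue (dic : List (String × Int)) : List (String × Int) :=
  let d := PySem.Dict.mk dic
  let sorted_values := PySem.List.sorted d.values (fun x => x)
  (sorted_values.foldl (fun sd i => pvAInner d i sd d.keys) PySem.Dict.empty).items

-- ===== PORT B =====
def sortByValue_alt (dic : List (String × Int)) : List (String × Int) :=
  -- first_key = {}; for k, v in dic.items(): if v not in first_key: first_key[v] = k
  let fk := dic.foldl (fun fk kv => if fk.contains kv.2 then fk else fk.insert kv.2 kv.1)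
      (PySem.Dict.empty : PySem.Dict Int String)
  -- {first_key[v]: v for v in sorted(first_key)}   (first_key[v] cannot raise: v ranges over fk's keys)
  ((PySem.List.sorted fk.keys (fun x => x)).foldl
      (fun d v => d.insert (fk.getD v "") v) (PySem.Dict.empty : PySem.Dict String Int)).items

-- ===== PRECONDITION & SPEC =====
-- Pre_ excludes association lists with duplicate keys: they do not represent any Python dict
-- (Python's dict construction collapses duplicate keys before sortByValue ever sees them), so the
-- assoc-list ports' first-match lookup has no Python counterpart there.
def Pre_sortByValue (dic : List (String × Int)) : Prop := (dic.map Prod.fst).Nodup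
instance (dic : List (String × Int)) : Decidable (Pre_sortByValue dic) := by unfold Pre_sortByValue; infer_instance
def pvWitness_sortByValue : (List (String × Int)) := [("a", 3), ("b", 1), ("c", 3), ("d", 2)]
def Spec_sortByValue (dic : List (String × Int)) (out : List (String × Int)) : Prop := out = sortByValue_alt dic
instance (dic : List (String × Int)) (out : List (String × Int)) : Decidable (Spec_sortByValue dic out) := by unfold Spec_sortByValue; infer_instance

-- ===== CLAIM (what is proved, stated in full; the proofs are below) =====
def Claim_equal_sortByValue : Prop := ∀ (dic : List (String × Int)), Dom_sortByValue dic → Pre_sortByValue dic → Spec_sortByValue dic (sortByValue dic)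

-- ===== LEMMAS AND PROOFS =====

-- the first key of dic carrying value v (both programs key their result dicts by it)
def pvF (dic : List (String × Int)) (v : Int) : String :=
  ((dic.find? (fun p => p.2 == v)).map Prod.fst).getD ""

theorem pv_find?_congr {α : Type} (l : List α) (p q : α → Bool) (h : ∀ x ∈ l, p x = q x) :
    l.find? p = l.find? q := by
  induction l with
  | nil => rfl
  | cons a t ih =>
    simp only [List.find?_cons, h a (by simp)]
    cases q a <;> simp [ih (fun x hx => h x (by simp [hx]))]

theorem pvAInner_eq_find? (d : PySem.Dict String Int) (i : Int) (sd : PySem.Dict String Int)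
    (ks : List String) :
    pvAInner d i sd ks = match ks.find? (fun k => d.getD k 0 == i) with
      | some k => sd.insert k (d.getD k 0)
      | none => sd := by
  induction ks with
  | nil => rfl
  | cons k ks ih =>
    simp only [pvAInner, List.find?_cons]
    by_cases h : (d.getD k 0 == i) = true <;> simp [h, ih]

theorem pv_mk_find_keys (dic : List (String × Int)) (i : Int)
    (hnd : (dic.map Prod.fst).Nodup) :
    (dic.map Prod.fst).find? (fun k => (PySem.Dict.mk dic).getD k 0 == i)
      = (dic.find? (fun p => p.2 == i)).map Prod.fst := by
  induction dic with
  | nil => rfl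
  | cons p t ih =>
    obtain ⟨k0, v0⟩ := p
    simp only [List.map_cons] at hnd
    obtain ⟨hk0, hndt⟩ := List.nodup_cons.mp hnd
    simp only [List.map_cons, List.find?_cons]
    have hget : (PySem.Dict.mk ((k0, v0) :: t)).getD k0 0 = v0 := by
      simp [PySem.Dict.getD_eq_get?_getD, PySem.Dict.get?_mk_cons]
    rw [hget]
    by_cases h : (v0 == i) = true
    · simp [h]
    · simp only [h]
      rw [pv_find?_congr (t.map Prod.fst)
            (fun k => (PySem.Dict.mk ((k0, v0) :: t)).getD k 0 == i)
            (fun k => (PySem.Dict.mk t).getD k 0 == i) ?_]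
      · exact ih hndt
      · intro k hk
        have hkne : (k0 == k) = false := by
          simp only [beq_eq_false_iff_ne, ne_eq]
          rintro rfl
          exact hk0 hk
        simp [PySem.Dict.getD_eq_get?_getD, PySem.Dict.get?_mk_cons, hkne]

theorem pv_get?_mk_of_mem (dic : List (String × Int)) (v : Int)
    (hnd : (dic.map Prod.fst).Nodup) (hv : v ∈ dic.map Prod.snd) :
    (PySem.Dict.mk dic).get? (pvF dic v) = some v := by
  obtain ⟨p, hp, hpv⟩ := List.mem_map.mp hv
  have hs : (dic.find? (fun q => q.2 == v)).isSome :=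
    List.find?_isSome.mpr ⟨p, hp, by simp [hpv]⟩
  obtain ⟨q, hq⟩ := Option.isSome_iff_exists.mp hs
  have hq2 : q.2 = v := by simpa using List.find?_some hq
  have hqm : q ∈ dic := List.mem_of_find?_eq_some hq
  unfold pvF
  rw [hq]
  simp only [Option.map_some, Option.getD_some]
  have hmem : (q.1, v) ∈ (PySem.Dict.mk dic).items := by
    show (q.1, v) ∈ dic
    rw [← hq2]
    exact hqm
  exact PySem.Dict.get?_of_mem_items _ hmem (by simpa [PySem.Dict.keys] using hnd)

theorem pvF_inj (dic : List (String × Int)) (a b : Int)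
    (hnd : (dic.map Prod.fst).Nodup) (ha : a ∈ dic.map Prod.snd) (hb : b ∈ dic.map Prod.snd)
    (h : pvF dic a = pvF dic b) : a = b := by
  have h1 := pv_get?_mk_of_mem dic a hnd ha
  have h2 := pv_get?_mk_of_mem dic b hnd hb
  rw [h, h2] at h1
  exact (Option.some_inj.mp h1).symm

theorem pv_insert_eq_self {κ ν : Type} [BEq κ] [LawfulBEq κ] (d : PySem.Dict κ ν) (k : κ) (v : ν)
    (hnd : d.keys.Nodup) (h : d.get? k = some v) : d.insert k v = d := by
  have hc : d.contains k = true := by rw [PySem.Dict.contains_eq_isSome_get?, h]; rfl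
  apply PySem.Dict.ext
  rw [PySem.Dict.items_insert_of_contains d v hc]
  conv_rhs => rw [← List.map_id d.items]
  apply List.map_congr_left
  intro p hp
  by_cases hk : (p.1 == k) = true
  · have hpk : p.1 = k := eq_of_beq hk
    have hg : d.get? p.1 = some p.2 :=
      PySem.Dict.get?_of_mem_items d (by simpa using hp) hnd
    rw [hpk, h] at hg
    rw [if_pos hk, Option.some_inj.mp hg, ← hpk]
    rfl
  · simp [hk]

theorem pv_foldl_add_prefix {α : Type} [BEq α] (s : List α) (u : List α) :
    ∃ t, List.foldl PySem.Set.add u s = u ++ t ∧ t.Sublist s := by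
  induction s generalizing u with
  | nil => exact ⟨[], by simp⟩
  | cons a s ih =>
    simp only [List.foldl_cons, PySem.Set.add]
    by_cases h : PySem.Set.contains u a = true
    · rw [if_pos h]
      obtain ⟨t, ht, hs⟩ := ih u
      exact ⟨t, ht, hs.cons a⟩
    · rw [if_neg h]
      obtain ⟨t, ht, hs⟩ := ih (u ++ [a])
      refine ⟨a :: t, by simpa using ht, hs.cons₂ a⟩

-- the A-side fold of inserts keyed by pvF: items accumulate exactly the fresh values, in Set.add order
theorem pv_foldA (dic : List (String × Int)) (s u : List Int) (d : PySem.Dict String Int)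
    (hnd : d.keys.Nodup) (hkeys : d.keys = u.map (pvF dic))
    (hval : ∀ v ∈ u, d.get? (pvF dic v) = some v)
    (hinj : ∀ a ∈ u ++ s, ∀ b ∈ u ++ s, pvF dic a = pvF dic b → a = b) :
    (s.foldl (fun sd i => sd.insert (pvF dic i) i) d).items
      = d.items ++ ((List.foldl PySem.Set.add u s).drop u.length).map (fun v => (pvF dic v, v)) := by
  induction s generalizing u d with
  | nil => simp
  | cons a s ih =>
    simp only [List.foldl_cons]
    by_cases ha : a ∈ u
    · have hga : d.get? (pvF dic a) = some a := hval a ha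
      rw [pv_insert_eq_self d (pvF dic a) a hnd hga]
      have hadd : PySem.Set.add u a = u := by
        simp only [PySem.Set.add]
        rw [if_pos ((PySem.Set.contains_iff u a).mpr ha)]
      rw [hadd]
      exact ih u d hnd hkeys hval (fun x hx y hy =>
        hinj x (by simp at hx ⊢; tauto) y (by simp at hy ⊢; tauto))
    · have hcon : d.contains (pvF dic a) = false := by
        rcases hc : d.contains (pvF dic a) with _ | _
        · rfl
        · exfalso
          have hmem : pvF dic a ∈ d.keys := (PySem.Dict.contains_iff_mem_keys d _).mp hc
          rw [hkeys] at hmem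
          obtain ⟨b, hb, hfb⟩ := List.mem_map.mp hmem
          have hab : b = a := hinj b (by simp [hb]) a (by simp) hfb
          exact ha (hab ▸ hb)
      have hadd : PySem.Set.add u a = u ++ [a] := by
        simp only [PySem.Set.add]
        rw [if_neg]
        intro hc
        exact ha ((PySem.Set.contains_iff u a).mp hc)
      rw [hadd]
      have hkeys' : (d.insert (pvF dic a) a).keys = (u ++ [a]).map (pvF dic) := by
        rw [PySem.Dict.keys_insert_of_not_contains d a hcon, hkeys]
        simp
      have hnd' := PySem.Dict.nodup_keys_insert d (pvF dic a) a hnd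
      have hval' : ∀ v ∈ u ++ [a], (d.insert (pvF dic a) a).get? (pvF dic v) = some v := by
        intro v hv
        rw [PySem.Dict.get?_insert]
        rcases (by simpa using hv : v ∈ u ∨ v = a) with hv' | rfl
        · rw [if_neg]
          · exact hval v hv'
          · intro he
            have : v = a := hinj v (by simp [hv']) a (by simp) he
            exact ha (this ▸ hv')
        · rw [if_pos rfl]
      have hinj' : ∀ x ∈ (u ++ [a]) ++ s, ∀ y ∈ (u ++ [a]) ++ s,
          pvF dic x = pvF dic y → x = y := by
        intro x hx y hy
        exact hinj x (by simp at hx ⊢; tauto) y (by simp at hy ⊢; tauto)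
      rw [ih (u ++ [a]) _ hnd' hkeys' hval' hinj',
        PySem.Dict.items_insert_of_not_contains d a hcon]
      obtain ⟨t, ht, -⟩ := pv_foldl_add_prefix s (u ++ [a])
      rw [ht]
      rw [show List.drop (u ++ [a]).length ((u ++ [a]) ++ t) = t from List.drop_left]
      rw [show List.drop u.length ((u ++ [a]) ++ t) = [a] ++ t from by
            rw [List.append_assoc, List.drop_left]]
      simp

theorem pvA_items (dic : List (String × Int)) (hnd : (dic.map Prod.fst).Nodup) :
    sortByValue dic
      = (PySem.List.dedup (PySem.List.sorted (dic.map Prod.snd) (fun x => x))).map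
          (fun v => (pvF dic v, v)) := by
  have hshow : sortByValue dic
      = ((PySem.List.sorted (dic.map Prod.snd) (fun x => x)).foldl
          (fun sd i => pvAInner (PySem.Dict.mk dic) i sd (dic.map Prod.fst))
          PySem.Dict.empty).items := rfl
  rw [hshow]
  rw [PySem.List.foldl_congr_mem _ _
    (fun sd i => sd.insert (pvF dic i) i) _ ?_]
  · have := pv_foldA dic (PySem.List.sorted (dic.map Prod.snd) (fun x => x)) []
      PySem.Dict.empty PySem.Dict.nodup_keys_empty (by simp [PySem.Dict.keys_empty])
      (by intro v hv; simp at hv)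
      (by
        intro x hx y hy hf
        have hx' : x ∈ dic.map Prod.snd := by
          rw [← PySem.List.mem_sorted (dic.map Prod.snd) (fun x => x) false]
          simpa using hx
        have hy' : y ∈ dic.map Prod.snd := by
          rw [← PySem.List.mem_sorted (dic.map Prod.snd) (fun x => x) false]
          simpa using hy
        exact pvF_inj dic x y hnd hx' hy' hf)
    rw [this]
    rfl
  · intro sd i hi
    have hi' : i ∈ dic.map Prod.snd := by
      rw [← PySem.List.mem_sorted (dic.map Prod.snd) (fun x => x) false]
      exact hi
    rw [pvAInner_eq_find?, pv_mk_find_keys dic i hnd]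
    have hs : (dic.find? (fun q => q.2 == i)).isSome := by
      obtain ⟨p, hp, hpv⟩ := List.mem_map.mp hi'
      exact List.find?_isSome.mpr ⟨p, hp, by simp [hpv]⟩
    obtain ⟨q, hq⟩ := Option.isSome_iff_exists.mp hs
    have hqf : pvF dic i = q.1 := by unfold pvF; rw [hq]; rfl
    have hgq : (PySem.Dict.mk dic).get? (pvF dic i) = some i := pv_get?_mk_of_mem dic i hnd hi'
    have hgd : (PySem.Dict.mk dic).getD q.1 0 = i := by
      rw [← hqf]
      exact PySem.Dict.getD_of_get?_eq_some _ _ hgq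
    rw [hq]
    simp only [Option.map_some]
    rw [hgd, hqf]

-- B-side first_key fold: lookup, key membership, key uniqueness
theorem pvB_get? (l : List (String × Int)) (acc : PySem.Dict Int String) (v : Int) :
    (l.foldl (fun fk kv => if fk.contains kv.2 then fk else fk.insert kv.2 kv.1) acc).get? v
      = match acc.get? v with
        | some k => some k
        | none => (l.find? (fun p => p.2 == v)).map Prod.fst := by
  induction l generalizing acc with
  | nil => cases h : acc.get? v <;> simp [h]
  | cons p t ih =>
    simp only [List.foldl_cons, List.find?_cons]
    by_cases hc : acc.contains p.2 = true
    · rw [if_pos hc, ih acc]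
      rcases h : acc.get? v with _ | k
      · have hne : (p.2 == v) = false := by
          simp only [beq_eq_false_iff_ne, ne_eq]
          rintro rfl
          rw [PySem.Dict.contains_eq_isSome_get?, h] at hc
          exact Bool.false_ne_true hc
        simp [hne]
      · rfl
    · rw [if_neg hc, ih (acc.insert p.2 p.1)]
      by_cases hv : v = p.2
      · have h0 : acc.get? v = none := by
          cases h : acc.get? v with
          | none => rfl
          | some k =>
            exfalso
            apply hc
            rw [PySem.Dict.contains_eq_isSome_get?, ← hv, h]
            rfl
        rw [PySem.Dict.get?_insert, if_pos hv, h0]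
        have hb : (p.2 == v) = true := by simp [hv]
        simp [hb]
      · rw [PySem.Dict.get?_insert, if_neg hv]
        have hne : (p.2 == v) = false := by
          simp only [beq_eq_false_iff_ne, ne_eq]
          rintro rfl
          exact hv rfl
        simp [hne]

theorem pvB_mem_keys (l : List (String × Int)) (acc : PySem.Dict Int String) (v : Int) :
    v ∈ (l.foldl (fun fk kv => if fk.contains kv.2 then fk else fk.insert kv.2 kv.1) acc).keys
      ↔ v ∈ acc.keys ∨ v ∈ l.map Prod.snd := by
  induction l generalizing acc with
  | nil => simp
  | cons p t ih =>
    simp only [List.foldl_cons, List.map_cons, List.mem_cons]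
    by_cases hc : acc.contains p.2 = true
    · rw [if_pos hc, ih acc]
      have hp : p.2 ∈ acc.keys := (PySem.Dict.contains_iff_mem_keys acc p.2).mp hc
      constructor
      · tauto
      · rintro (h | rfl | h) <;> tauto
    · rw [if_neg hc, ih (acc.insert p.2 p.1)]
      rw [PySem.Dict.mem_keys_insert]
      tauto

theorem pvB_nodup_keys (l : List (String × Int)) (acc : PySem.Dict Int String)
    (h : acc.keys.Nodup) :
    (l.foldl (fun fk kv => if fk.contains kv.2 then fk else fk.insert kv.2 kv.1) acc).keys.Nodup := by
  induction l generalizing acc with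
  | nil => exact h
  | cons p t ih =>
    simp only [List.foldl_cons]
    by_cases hc : acc.contains p.2 = true <;>
      simp only [hc, if_pos, if_neg, Bool.not_eq_true] <;>
      [exact ih acc h; exact ih _ (PySem.Dict.nodup_keys_insert _ _ _ h)]

theorem pvB_items (dic : List (String × Int)) (hnd : (dic.map Prod.fst).Nodup) :
    sortByValue_alt dic
      = (PySem.List.sorted
          (dic.foldl (fun fk kv => if fk.contains kv.2 then fk else fk.insert kv.2 kv.1)
            (PySem.Dict.empty : PySem.Dict Int String)).keys (fun x => x)).map
          (fun v => (pvF dic v, v)) := by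
  have hshow : sortByValue_alt dic
      = ((PySem.List.sorted
            (dic.foldl (fun fk kv => if fk.contains kv.2 then fk else fk.insert kv.2 kv.1)
              (PySem.Dict.empty : PySem.Dict Int String)).keys (fun x => x)).foldl
          (fun d v => d.insert
            ((dic.foldl (fun fk kv => if fk.contains kv.2 then fk else fk.insert kv.2 kv.1)
              (PySem.Dict.empty : PySem.Dict Int String)).getD v "") v)
          PySem.Dict.empty).items := rfl
  rw [hshow]
  have hgd : ∀ a : Int,
      (dic.foldl (fun fk kv => if fk.contains kv.2 then fk else fk.insert kv.2 kv.1)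
        (PySem.Dict.empty : PySem.Dict Int String)).getD a "" = pvF dic a := by
    intro a
    rw [PySem.Dict.getD_eq_get?_getD, pvB_get? dic PySem.Dict.empty a,
      PySem.Dict.get?_empty]
    rfl
  rw [PySem.Dict.items_foldl_insert_fresh
        (PySem.List.sorted
          (dic.foldl (fun fk kv => if fk.contains kv.2 then fk else fk.insert kv.2 kv.1)
            (PySem.Dict.empty : PySem.Dict Int String)).keys (fun x => x))
        (fun a => (dic.foldl (fun fk kv => if fk.contains kv.2 then fk else fk.insert kv.2 kv.1)
            (PySem.Dict.empty : PySem.Dict Int String)).getD a "")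
        (fun a => a) PySem.Dict.empty
        (fun a _ => PySem.Dict.contains_empty _) ?_]
  · rw [show (PySem.Dict.empty : PySem.Dict String Int).items = [] from rfl]
    rw [List.nil_append]
    apply List.map_congr_left
    intro a _
    rw [hgd a]
  · rw [List.map_congr_left (fun a _ => hgd a)]
    have hknd : (dic.foldl (fun fk kv => if fk.contains kv.2 then fk else fk.insert kv.2 kv.1)
        (PySem.Dict.empty : PySem.Dict Int String)).keys.Nodup :=
      pvB_nodup_keys dic PySem.Dict.empty (by simp [PySem.Dict.keys_empty])
    have hsnd : (PySem.List.sorted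
        (dic.foldl (fun fk kv => if fk.contains kv.2 then fk else fk.insert kv.2 kv.1)
          (PySem.Dict.empty : PySem.Dict Int String)).keys (fun x => x)).Nodup :=
      ((PySem.List.sorted_perm _ (fun x => x) false).nodup_iff).mpr hknd
    apply List.Nodup.map_on ?_ hsnd
    intro x hx y hy hf
    have hx' : x ∈ dic.map Prod.snd := by
      rw [PySem.List.mem_sorted] at hx
      rcases (pvB_mem_keys dic PySem.Dict.empty x).mp hx with h | h
      · rw [PySem.Dict.keys_empty] at h; cases h
      · exact h
    have hy' : y ∈ dic.map Prod.snd := by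
      rw [PySem.List.mem_sorted] at hy
      rcases (pvB_mem_keys dic PySem.Dict.empty y).mp hy with h | h
      · rw [PySem.Dict.keys_empty] at h; cases h
      · exact h
    exact pvF_inj dic x y hnd hx' hy' hf

theorem pv_sorted_keys_eq_dedup (dic : List (String × Int)) :
    PySem.List.sorted
        (dic.foldl (fun fk kv => if fk.contains kv.2 then fk else fk.insert kv.2 kv.1)
          (PySem.Dict.empty : PySem.Dict Int String)).keys (fun x => x)
      = PySem.List.dedup (PySem.List.sorted (dic.map Prod.snd) (fun x => x)) := by
  have hknd : (dic.foldl (fun fk kv => if fk.contains kv.2 then fk else fk.insert kv.2 kv.1)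
      (PySem.Dict.empty : PySem.Dict Int String)).keys.Nodup :=
    pvB_nodup_keys dic PySem.Dict.empty (by simp [PySem.Dict.keys_empty])
  apply PySem.List.sorted_eq_of_perm_of_pairwise_lt
  · rw [List.perm_ext_iff_of_nodup (PySem.List.nodup_dedup _) hknd]
    intro a
    rw [PySem.List.mem_dedup, PySem.List.mem_sorted, pvB_mem_keys dic PySem.Dict.empty a,
      PySem.Dict.keys_empty]
    simp
  · obtain ⟨t, ht, hsub⟩ :=
      pv_foldl_add_prefix (PySem.List.sorted (dic.map Prod.snd) (fun x => x)) []
    have hdt : PySem.List.dedup (PySem.List.sorted (dic.map Prod.snd) (fun x => x)) = t := by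
      show List.foldl PySem.Set.add PySem.Set.empty _ = t
      rw [show (PySem.Set.empty : PySem.Set Int) = ([] : List Int) from rfl, ht]
      rfl
    have hle : t.Pairwise (fun a b : Int => a ≤ b) :=
      List.Pairwise.sublist hsub (PySem.List.sorted_pairwise (dic.map Prod.snd) (fun x => x))
    have hne : t.Pairwise (fun a b : Int => a ≠ b) := by
      rw [← hdt]
      exact PySem.List.nodup_dedup _
    rw [hdt]
    exact (hle.and hne).imp (fun h => lt_of_le_of_ne h.1 h.2)

-- ===== VERDICT (by name: the statement is the Claim_ definition above) =====
theorem sortByValue_spec : Claim_equal_sortByValue := by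
  intro dic _ hpre
  unfold Spec_sortByValue
  rw [pvA_items dic hpre, pvB_items dic hpre, pv_sorted_keys_eq_dedup dic]
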